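-- pv_equiv track=rewrite | github.com/Thomaz-Castro/Conversor_Online | defs_copy.py | substituir_virgula
-- ===== SOURCE A (Python) =====
-- def substituir_virgula(texto):
--     novo_texto = ""
--     dentro_parenteses = False
--
--     for caractere in texto:
--         if caractere == "(":
--             dentro_parenteses = True
--         elif caractere == ")":
--             dentro_parenteses = False
--
--         if dentro_parenteses and caractere == ",":
--             novo_texto += caractere
--         elif not dentro_parenteses and caractere == ",":
--             novo_texto += "---X3X3x3,,,,,,,    ---"
--         else:
--             novo_texto += caractere
--
--     return novo_texto
-- ===== SOURCE B (Python) =====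
-- def substituir_virgula(texto):
--     # Segment-based: cut the text at bracket characters, bulk-replace commas
--     # in the outside segments, keep inside segments verbatim, join at the end.
--     MARCADOR = "---X3X3x3,,,,,,,    ---"
--     partes = []
--     dentro = False
--     i, n = 0, len(texto)
--     while i < n:
--         c = texto[i]
--         if c == "(":
--             dentro = True
--             partes.append(c)
--             i += 1
--         elif c == ")":
--             dentro = False
--             partes.append(c)
--             i += 1
--         else:
--             j = i
--             while j < n and texto[j] not in "()":
--                 j += 1
--             trecho = texto[i:j]
--             partes.append(trecho if dentro else trecho.replace(",", MARCADOR))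
--             i = j
--     return "".join(partes)
-- ===== Notes on version B (the rewrite author's own statement) =====
-- stated objective: idiomatic
-- what changed: A walks the text character by character, updating the flag and appending per character; B splits the text into bracket characters and maximal bracket-free segments, bulk-replaces commas in segments outside parentheses with str.replace, and joins the pieces.
import Mathlib
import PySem

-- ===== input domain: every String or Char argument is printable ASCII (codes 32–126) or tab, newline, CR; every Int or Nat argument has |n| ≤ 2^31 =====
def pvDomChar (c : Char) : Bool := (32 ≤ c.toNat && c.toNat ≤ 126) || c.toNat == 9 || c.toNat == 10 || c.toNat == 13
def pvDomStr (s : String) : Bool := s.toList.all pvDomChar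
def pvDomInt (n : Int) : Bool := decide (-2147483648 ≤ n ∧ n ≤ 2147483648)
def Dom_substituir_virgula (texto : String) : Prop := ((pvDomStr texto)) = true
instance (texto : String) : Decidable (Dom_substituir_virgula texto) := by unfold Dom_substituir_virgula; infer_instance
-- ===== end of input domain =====

-- B replaces A's per-character state machine by a segment decomposition (split at brackets,
-- bulk comma-replace of outside segments); objective: a different, more idiomatic decomposition.

-- the marker string both programs insert for a comma outside parentheses
def svMark : List Char := "---X3X3x3,,,,,,,    ---".toList

-- ===== PORT A =====
-- one iteration of A's for-loop: state = (novo_texto as chars, dentro_parenteses)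
def svStep (st : List Char × Bool) (c : Char) : List Char × Bool :=
  let dentro := if c = '(' then true else if c = ')' then false else st.2
  if dentro = true ∧ c = ',' then (st.1 ++ [c], dentro)
  else if dentro = false ∧ c = ',' then (st.1 ++ svMark, dentro)
  else (st.1 ++ [c], dentro)

def substituir_virgula (texto : String) : String :=
  String.mk (texto.toList.foldl svStep ([], false)).1

-- ===== PORT B =====
-- Source B's inner scan condition: texto[j] not in "()"
def svNotBracket (c : Char) : Bool := !(c = '(' || c = ')')

-- what Source B appends for one non-bracket segment
def svSegOut (dentro : Bool) (seg : List Char) : List Char :=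
  if dentro then seg else PySem.Chars.replace seg [','] svMark

-- Source B's outer while-loop: consume one bracket or one whole segment per step
def svGoB : List Char → Bool → List Char
  | [], _ => []
  | c :: rest, dentro =>
    if c = '(' then '(' :: svGoB rest true
    else if c = ')' then ')' :: svGoB rest false
    else svSegOut dentro (c :: rest.takeWhile svNotBracket) ++
           svGoB (rest.dropWhile svNotBracket) dentro
termination_by cs _ => cs.length
decreasing_by
· simp
· simp
· exact Nat.lt_succ_of_le (List.length_dropWhile_le _ _)

def substituir_virgula_alt (texto : String) : String :=
  String.mk (svGoB texto.toList false)

-- ===== PRECONDITION & SPEC =====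
def Spec_substituir_virgula (texto : String) (out : String) : Prop := out = substituir_virgula_alt texto
instance (texto : String) (out : String) : Decidable (Spec_substituir_virgula texto out) := by unfold Spec_substituir_virgula; infer_instance

-- ===== CLAIM (what is proved, stated in full; the proofs are below) =====
def Claim_equal_substituir_virgula : Prop := ∀ (texto : String), Dom_substituir_virgula texto → Spec_substituir_virgula texto (substituir_virgula texto)

-- ===== LEMMAS AND PROOFS =====

-- what A emits for one character, given the post-update flag b
def svOut (b : Bool) (c : Char) : List Char :=
  if b then [c] else if c = ',' then svMark else [c]

-- A's output as a simple recursion (proof-side characterisation of the foldl)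
def svGoA : List Char → Bool → List Char
  | [], _ => []
  | c :: rest, b =>
    let b' := if c = '(' then true else if c = ')' then false else b
    svOut b' c ++ svGoA rest b'

lemma svStep_eq (acc : List Char) (b : Bool) (c : Char) :
    svStep (acc, b) c =
      (acc ++ svOut (if c = '(' then true else if c = ')' then false else b) c,
       if c = '(' then true else if c = ')' then false else b) := by
  simp only [svStep, svOut]
  split_ifs <;> simp_all

lemma svFoldA (cs : List Char) : ∀ (acc : List Char) (b : Bool),
    (cs.foldl svStep (acc, b)).1 = acc ++ svGoA cs b := by
  induction cs with
  | nil => intro acc b; simp [svGoA]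
  | cons c rest ih =>
    intro acc b
    simp only [List.foldl_cons, svStep_eq, svGoA, ih, List.append_assoc]

lemma svReplace_go (fuel : Nat) : ∀ (l acc : List Char), l.length ≤ fuel →
    PySem.Chars.replace.go [','] svMark fuel l acc =
      acc.reverse ++ l.flatMap (fun c => if c = ',' then svMark else [c]) := by
  induction fuel with
  | zero =>
    intro l acc h
    have : l = [] := List.eq_nil_of_length_eq_zero (Nat.le_zero.mp h)
    subst this
    simp [PySem.Chars.replace.go]
  | succ fuel ih =>
    intro l acc h
    match l with
    | [] => simp [PySem.Chars.replace.go]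
    | c :: t =>
      by_cases hc : c = ','
      · subst hc
        have hpre : List.isPrefixOf [','] (',' :: t) = true := by
          simp [List.isPrefixOf]
        rw [PySem.Chars.replace.go]
        simp only [hpre, if_true, List.length_cons, List.length_nil, List.drop_succ_cons,
          List.drop_zero]
        rw [ih t _ (by simpa using Nat.le_of_succ_le_succ h)]
        simp
      · have hpre : List.isPrefixOf [','] (c :: t) = false := by
          simp [List.isPrefixOf]
          exact fun h => hc h.symm
        rw [PySem.Chars.replace.go]
        simp only [hpre]
        rw [ih t _ (by simpa using Nat.le_of_succ_le_succ h)]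
        simp [hc]

lemma svReplace_eq (seg : List Char) :
    PySem.Chars.replace seg [','] svMark =
      seg.flatMap (fun c => if c = ',' then svMark else [c]) := by
  rw [PySem.Chars.replace]
  simp only [List.isEmpty_cons, if_false, Bool.false_eq_true]
  simpa using svReplace_go seg.length seg [] le_rfl

lemma svOut_true : svOut true = fun c => [c] :=
  funext fun c => by simp [svOut]

lemma svOut_false : svOut false = fun c => if c = ',' then svMark else [c] :=
  funext fun c => by simp [svOut]

lemma svSegOut_eq (b : Bool) (seg : List Char) :
    svSegOut b seg = seg.flatMap (svOut b) := by
  cases b with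
  | true => simp [svSegOut, svOut_true]
  | false => simp [svSegOut, svReplace_eq, svOut_false]

lemma svGoA_append_seg (seg : List Char) (hseg : ∀ x ∈ seg, svNotBracket x = true) :
    ∀ (rest : List Char) (b : Bool),
      svGoA (seg ++ rest) b = seg.flatMap (svOut b) ++ svGoA rest b := by
  induction seg with
  | nil => intro rest b; simp
  | cons x seg ih =>
    intro rest b
    have hx := hseg x (by simp)
    have hx1 : ¬ x = '(' := by
      intro h; simp [svNotBracket, h] at hx
    have hx2 : ¬ x = ')' := by
      intro h; simp [svNotBracket, h] at hx
    simp only [List.cons_append, svGoA, if_neg hx1, if_neg hx2, List.flatMap_cons,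
      List.append_assoc]
    rw [ih (fun y hy => hseg y (by simp [hy]))]

lemma svGoB_eq_svGoA : ∀ (cs : List Char) (b : Bool), svGoB cs b = svGoA cs b := by
  intro cs b
  induction cs, b using svGoB.induct with
  | case1 b => simp [svGoB, svGoA]
  | case2 rest b ih =>
    simp [svGoB, svGoA, svOut, ih]
  | case3 rest b h ih =>
    simp [svGoB, svGoA, svOut, ih]
  | case4 c rest b hc1 hc2 ih =>
    rw [svGoB]
    simp only [if_neg hc1, if_neg hc2]
    have hseg : ∀ x ∈ c :: rest.takeWhile svNotBracket, svNotBracket x = true := by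
      intro x hx
      rcases List.mem_cons.mp hx with h | h
      · subst h; simp [svNotBracket, hc1, hc2]
      · exact List.mem_takeWhile_imp h
    have hsplit : (c :: rest.takeWhile svNotBracket) ++ rest.dropWhile svNotBracket
        = c :: rest := by
      simp [List.takeWhile_append_dropWhile]
    calc svSegOut b (c :: rest.takeWhile svNotBracket) ++
            svGoB (rest.dropWhile svNotBracket) b
        = (c :: rest.takeWhile svNotBracket).flatMap (svOut b) ++
            svGoA (rest.dropWhile svNotBracket) b := by
          rw [svSegOut_eq, ih]
      _ = svGoA ((c :: rest.takeWhile svNotBracket) ++ rest.dropWhile svNotBracket) b := by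
          rw [svGoA_append_seg _ hseg]
      _ = svGoA (c :: rest) b := by rw [hsplit]

-- ===== VERDICT (by name: the statement is the Claim_ definition above) =====
theorem substituir_virgula_spec : Claim_equal_substituir_virgula := by
  intro texto _
  unfold Spec_substituir_virgula substituir_virgula substituir_virgula_alt
  rw [svFoldA, svGoB_eq_svGoA]
  simp
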